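-- pv_equiv track=rewrite | github.com/AndSam321/CodingPractice | CodeWars/7Kyu/red_knight.py | red_knight
-- ===== SOURCE A (Python) =====
-- def red_knight(N, P):
--     knight_pos = 0
--     knight_vertical = N  # 0 for White, 1 for Black
--     pawn_pos = P
--
--     while True:
--         # If the knight catches a pawn at this position
--         if knight_pos == pawn_pos:
--             pawn = "White" if knight_vertical == 0 else "Black"
--             return (pawn, knight_pos)
--
--         # Move Red Knight: 2 steps forward, 1 step vertical
--         knight_pos += 2
--         knight_vertical = 1 - knight_vertical  # Toggle between 0 and 1
--
--         # Move pawns: 1 step forward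
--         pawn_pos += 1
-- ===== SOURCE B (Python) =====
-- def red_knight(N, P):
--     # Closed form: the knight gains one square on the pawn each turn, so the
--     # catch happens after exactly P turns, at square 2*P, with the knight's
--     # vertical value toggled P times.
--     vert = N if P % 2 == 0 else 1 - N
--     return ("White" if vert == 0 else "Black", 2 * P)
-- ===== Notes on version B (the rewrite author's own statement) =====
-- stated objective: faster
-- what changed: Replaced the step-by-step chase loop with a closed form: catch after P turns at square 2*P, color from the parity of P toggling N.
-- outside the precondition, e.g. on red_knight(0, -1): A does not finish within the time limit, B returns ('Black', -2)
import Mathlib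
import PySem

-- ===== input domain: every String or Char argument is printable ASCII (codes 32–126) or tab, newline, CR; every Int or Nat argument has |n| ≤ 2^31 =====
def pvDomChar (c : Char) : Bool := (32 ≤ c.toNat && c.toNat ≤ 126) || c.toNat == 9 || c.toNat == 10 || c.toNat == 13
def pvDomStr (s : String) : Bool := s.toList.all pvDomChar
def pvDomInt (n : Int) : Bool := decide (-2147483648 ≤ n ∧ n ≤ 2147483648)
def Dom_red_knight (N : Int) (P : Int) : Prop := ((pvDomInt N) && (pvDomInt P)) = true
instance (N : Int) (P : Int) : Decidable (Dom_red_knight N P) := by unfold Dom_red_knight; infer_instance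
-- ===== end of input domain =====

-- B replaces A's step-by-step chase loop with a closed form (catch after P turns at 2*P); faster.

-- ===== PORT A =====
-- A's `while True` chase loop; the `knight_pos > pawn_pos` branch is a totality
-- guard only (never reached when the loop terminates in Python, i.e. 0 ≤ P).
def red_knight_loop (knight_pos knight_vertical pawn_pos : Int) : String × Int :=
  if knight_pos = pawn_pos then
    (if knight_vertical = 0 then "White" else "Black", knight_pos)
  else if pawn_pos < knight_pos then ("", 0)  -- Python diverges here; outside Pre_
  else red_knight_loop (knight_pos + 2) (1 - knight_vertical) (pawn_pos + 1)
termination_by (pawn_pos - knight_pos).toNat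
decreasing_by omega

def red_knight (N : Int) (P : Int) : String × Int :=
  red_knight_loop 0 N P

-- ===== PORT B =====
def red_knight_alt (N : Int) (P : Int) : String × Int :=
  let vert : Int := if PySem.Int.mod P 2 = 0 then N else 1 - N
  (if vert = 0 then "White" else "Black", 2 * P)

-- ===== PRECONDITION & SPEC =====
-- A's while-loop never terminates when P < 0 (the knight only gains ground), so Pre_ requires 0 ≤ P.
def Pre_red_knight (N : Int) (P : Int) : Prop := 0 ≤ P
instance (N : Int) (P : Int) : Decidable (Pre_red_knight N P) := by unfold Pre_red_knight; infer_instance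
def pvWitness_red_knight : Int × Int := (1, 5)

def Spec_red_knight (N : Int) (P : Int) (out : String × Int) : Prop := out = red_knight_alt N P
instance (N : Int) (P : Int) (out : String × Int) : Decidable (Spec_red_knight N P out) := by unfold Spec_red_knight; infer_instance

-- ===== CLAIM =====
def Claim_equal_red_knight : Prop := ∀ (N : Int) (P : Int), Dom_red_knight N P → Pre_red_knight N P → Spec_red_knight N P (red_knight N P)

-- ===== LEMMAS AND PROOFS =====
lemma red_knight_loop_closed (d : Nat) : ∀ (k v : Int),
    red_knight_loop k v (k + d) =
      (if (if d % 2 = 0 then v else 1 - v) = 0 then "White" else "Black", k + 2 * d) := by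
  induction d with
  | zero => intro k v; rw [red_knight_loop]; simp
  | succ n ih =>
    intro k v
    rw [red_knight_loop]
    have h1 : ¬ (k = k + ((n : Int) + 1)) := by omega
    have h2 : ¬ (k + ((n : Int) + 1) < k) := by omega
    have h3 : k + ((n : Int) + 1) + 1 = (k + 2) + (n : Int) := by ring
    push_cast
    simp only [h1, h2, if_false, h3]
    have := ih (k + 2) (1 - v)
    push_cast at this
    rw [this]
    by_cases hn : n % 2 = 0
    · have h5 : ¬ ((n + 1) % 2 = 0) := by omega
      rw [if_pos hn, if_neg h5]
      exact Prod.ext rfl (by push_cast; ring)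
    · have h5 : (n + 1) % 2 = 0 := by omega
      rw [if_neg hn, if_pos h5]
      have hv : 1 - (1 - v) = v := by ring
      rw [hv]
      exact Prod.ext rfl (by push_cast; ring)

-- ===== VERDICT =====
theorem red_knight_spec : Claim_equal_red_knight := by
  intro N P _ hP
  have hP0 : 0 ≤ P := hP
  unfold Spec_red_knight red_knight red_knight_alt
  have hP' : P = (0 : Int) + (P.toNat : Nat) := by omega
  rw [hP', red_knight_loop_closed P.toNat 0 N]
  have hmod : PySem.Int.mod ((0:Int) + (P.toNat : Nat)) 2 = 0 ↔ P.toNat % 2 = 0 := by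
    rw [PySem.Int.mod_eq_emod_of_pos (by omega : (0:Int) < 2)]
    omega
  dsimp only
  by_cases h : P.toNat % 2 = 0
  · rw [if_pos h, if_pos (hmod.mpr h)]
    exact Prod.ext rfl (by push_cast; ring)
  · rw [if_neg h, if_neg (fun hc => h (hmod.mp hc))]
    exact Prod.ext rfl (by push_cast; ring)
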